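-- pv_equiv track=rewrite | github.com/kolesnykovVladyslav/advent-of-code-2023 | task5/task5.py | find_lowest_location_b
-- ===== SOURCE A (Python) =====
-- def find_lowest_location_b(maps, seeds):
--     seed_ranges = []
--     for i in range(0, len(seeds), 2):
--         seed_ranges.append((seeds[i], seeds[i] + seeds[i + 1]))
--     ranges_to_check = seed_ranges
--     for mapping in maps.values():
--         ranges = mapping.values()
--         _next = []
--         while len(ranges_to_check) > 0:
--             found = False
--             start_range, end_range = ranges_to_check.pop()
--             for destination, source, _range in ranges:
--                 start_overlap = max(start_range, source)
--                 end_overlap = min(end_range, source + _range)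
--                 if start_overlap < end_overlap:
--                     _next.append((start_overlap - source + destination, end_overlap - source + destination))
--                     found = True
--                     if start_overlap > start_range:
--                         ranges_to_check.append((start_range, start_overlap))
--                     if end_range > end_overlap:
--                         ranges_to_check.append((end_overlap, end_range))
--             if not found:
--                 _next.append((start_range, end_range))
--         ranges_to_check = _next
--     return min(ranges_to_check)[0]
-- ===== SOURCE B (Python) =====
-- # B: per-range recursive splitting composed with comprehensions, instead of A's
-- # shared mutable worklist with pop/push and a found flag.
--
-- def _convert(s, e, entries):
--     """Split [s, e) against all entries: collect the mapped overlaps in one pass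
--     together with the uncovered leftover pieces, then recurse on the leftovers."""
--     mapped = []
--     rest = []
--     for d, src, ln in entries:
--         os, oe = max(s, src), min(e, src + ln)
--         if os < oe:
--             mapped.append((os - src + d, oe - src + d))
--             if s < os:
--                 rest.append((s, os))
--             if oe < e:
--                 rest.append((oe, e))
--     if not mapped:
--         return [(s, e)]
--     return mapped + [p for q in rest for p in _convert(q[0], q[1], entries)]
--
--
-- def _pairs(xs):
--     if not xs:
--         return []
--     return [(xs[0], xs[0] + xs[1])] + _pairs(xs[2:])
--
--
-- def find_lowest_location_b(maps, seeds):
--     ranges = _pairs(seeds)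
--     for mapping in maps.values():
--         entries = list(mapping.values())
--         ranges = [p for r in ranges for p in _convert(r[0], r[1], entries)]
--     return min(ranges)[0]
-- ===== Notes on version B (the rewrite author's own statement) =====
-- stated objective: alternative
-- what changed: A drains a shared mutable worklist (pop from the end, push split-off pieces back, found flag) per map layer; B is a self-contained recursive range splitter (one pass collects mapped overlaps and leftover pieces, then recurses on the leftovers) composed over the layers with flat-map comprehensions.
import Mathlib
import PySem

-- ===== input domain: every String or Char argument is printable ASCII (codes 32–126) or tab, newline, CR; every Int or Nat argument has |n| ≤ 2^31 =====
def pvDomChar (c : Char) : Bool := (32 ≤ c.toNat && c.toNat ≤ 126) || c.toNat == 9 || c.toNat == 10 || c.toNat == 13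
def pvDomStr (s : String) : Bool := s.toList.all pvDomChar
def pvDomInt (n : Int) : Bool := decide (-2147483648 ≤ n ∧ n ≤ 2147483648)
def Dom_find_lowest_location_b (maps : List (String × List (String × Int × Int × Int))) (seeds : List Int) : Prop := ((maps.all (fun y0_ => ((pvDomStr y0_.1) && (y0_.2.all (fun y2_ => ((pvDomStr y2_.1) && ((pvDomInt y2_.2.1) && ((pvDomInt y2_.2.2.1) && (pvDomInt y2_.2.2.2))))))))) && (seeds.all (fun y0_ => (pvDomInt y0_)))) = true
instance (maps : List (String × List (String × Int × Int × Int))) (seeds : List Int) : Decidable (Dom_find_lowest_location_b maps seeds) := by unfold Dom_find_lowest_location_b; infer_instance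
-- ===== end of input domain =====

-- B replaces A's shared mutable worklist (pop/push, found flag) with a per-range
-- recursive splitter composed with flat-maps; objective: alternative (same cost).

-- ===== PORT A =====
-- length of a half-open range, and the termination measure for A's worklist loop
def pvLen (r : Int × Int) : Nat := (r.2 - r.1).toNat
def pvMeasure (k : Nat) (st : List (Int × Int)) : Nat :=
  (st.map (fun r => (2 * k + 2) ^ pvLen r)).sum

-- specification views of one pass of the inner `for` loop over a map's entries
-- (used only to prove termination of the ports and in the equivalence proofs)
def pvFound (s e : Int) (entries : List (Int × Int × Int)) : Bool :=
  entries.any (fun t => decide (max s t.2.1 < min e (t.2.1 + t.2.2)))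
def pvMapped (s e : Int) (entries : List (Int × Int × Int)) : List (Int × Int) :=
  entries.flatMap (fun t =>
    if max s t.2.1 < min e (t.2.1 + t.2.2) then
      [(max s t.2.1 - t.2.1 + t.1, min e (t.2.1 + t.2.2) - t.2.1 + t.1)]
    else [])
def pvPieces (s e : Int) (entries : List (Int × Int × Int)) : List (Int × Int) :=
  entries.flatMap (fun t =>
    if max s t.2.1 < min e (t.2.1 + t.2.2) then
      (if max s t.2.1 > s then [(s, max s t.2.1)] else []) ++
      (if e > min e (t.2.1 + t.2.2) then [(min e (t.2.1 + t.2.2), e)] else [])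
    else [])

-- body of A's `for destination, source, _range in ranges` loop
def pvStepA (s e : Int) (st : Bool × List (Int × Int) × List (Int × Int))
    (t : Int × Int × Int) : Bool × List (Int × Int) × List (Int × Int) :=
  if max s t.2.1 < min e (t.2.1 + t.2.2) then
    (true,
     st.2.1 ++ [(max s t.2.1 - t.2.1 + t.1, min e (t.2.1 + t.2.2) - t.2.1 + t.1)],
     st.2.2 ++ (if max s t.2.1 > s then [(s, max s t.2.1)] else []) ++
               (if e > min e (t.2.1 + t.2.2) then [(min e (t.2.1 + t.2.2), e)] else []))
  else st

theorem pvFoldA_char (s e : Int) (entries : List (Int × Int × Int)) :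
    ∀ (f0 : Bool) (n0 s0 : List (Int × Int)),
      entries.foldl (pvStepA s e) (f0, n0, s0) =
        (f0 || pvFound s e entries, n0 ++ pvMapped s e entries, s0 ++ pvPieces s e entries) := by
  induction entries with
  | nil => intro f0 n0 s0; simp [pvFound, pvMapped, pvPieces]
  | cons t rest ih =>
      intro f0 n0 s0
      simp only [List.foldl_cons, pvStepA, pvFound, pvMapped, pvPieces, List.any_cons,
        List.flatMap_cons]
      by_cases h : max s t.2.1 < min e (t.2.1 + t.2.2)
      · simp only [h, if_pos, ih, pvFound, pvMapped, pvPieces]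
        simp [List.append_assoc]
      · simp only [h, ih, pvFound, pvMapped, pvPieces]
        simp

theorem pvPieces_len_lt {s e : Int} {entries : List (Int × Int × Int)} {p : Int × Int}
    (hp : p ∈ pvPieces s e entries) : pvLen p < pvLen (s, e) := by
  simp only [pvPieces, List.mem_flatMap] at hp
  obtain ⟨t, -, hp⟩ := hp
  by_cases h : max s t.2.1 < min e (t.2.1 + t.2.2)
  · simp only [h, if_pos, List.mem_append] at hp
    have h1 : s ≤ max s t.2.1 := le_max_left _ _
    have h2 : min e (t.2.1 + t.2.2) ≤ e := min_le_left _ _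
    rcases hp with hp | hp
    · by_cases hg : max s t.2.1 > s
      · simp only [hg, if_pos, List.mem_singleton] at hp
        subst hp; simp only [pvLen]; omega
      · simp [hg] at hp
    · by_cases hg : e > min e (t.2.1 + t.2.2)
      · simp only [hg, if_pos, List.mem_singleton] at hp
        subst hp; simp only [pvLen]; omega
      · simp [hg] at hp
  · simp [h] at hp

theorem pvPieces_length_le (s e : Int) (entries : List (Int × Int × Int)) :
    (pvPieces s e entries).length ≤ 2 * entries.length := by
  induction entries with
  | nil => simp [pvPieces]
  | cons t rest ih =>
      simp only [pvPieces, List.flatMap_cons, List.length_append, List.length_cons] at *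
      have : (if max s t.2.1 < min e (t.2.1 + t.2.2) then
          (if max s t.2.1 > s then [(s, max s t.2.1)] else []) ++
          (if e > min e (t.2.1 + t.2.2) then [(min e (t.2.1 + t.2.2), e)] else [])
        else []).length ≤ 2 := by
        split_ifs <;> simp
      omega

theorem pvMeasure_pieces_lt (s e : Int) (entries : List (Int × Int × Int)) :
    pvMeasure entries.length (pvPieces s e entries) < (2 * entries.length + 2) ^ pvLen (s, e) := by
  set B := 2 * entries.length + 2 with hB
  rcases eq_or_ne (pvPieces s e entries) [] with hnil | hne
  · rw [pvMeasure, hnil]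
    simpa using Nat.pow_pos (n := pvLen (s, e)) (by omega : 0 < B)
  · obtain ⟨p, hp⟩ := List.exists_mem_of_ne_nil _ hne
    have hL : 1 ≤ pvLen (s, e) := by
      have := pvPieces_len_lt (s := s) (e := e) hp; omega
    have hbound : ∀ x ∈ (pvPieces s e entries).map (fun r => B ^ pvLen r),
        x ≤ B ^ (pvLen (s, e) - 1) := by
      intro x hx
      simp only [List.mem_map] at hx
      obtain ⟨r, hr, rfl⟩ := hx
      exact Nat.pow_le_pow_right (by omega) (by have := pvPieces_len_lt hr; omega)
    have hsum := List.sum_le_card_nsmul _ _ hbound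
    simp only [List.length_map, smul_eq_mul] at hsum
    have hlen := pvPieces_length_le s e entries
    have hle : pvMeasure entries.length (pvPieces s e entries)
        ≤ 2 * entries.length * B ^ (pvLen (s, e) - 1) := by
      calc pvMeasure entries.length (pvPieces s e entries)
          ≤ (pvPieces s e entries).length * B ^ (pvLen (s, e) - 1) := hsum
        _ ≤ 2 * entries.length * B ^ (pvLen (s, e) - 1) := Nat.mul_le_mul_right _ hlen
    have hpow : B ^ (pvLen (s, e) - 1 + 1) = B ^ (pvLen (s, e)) := by congr 1; omega
    have hlt : 2 * entries.length * B ^ (pvLen (s, e) - 1) < B * B ^ (pvLen (s, e) - 1) := by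
      have hp1 : 0 < B ^ (pvLen (s, e) - 1) := Nat.pow_pos (by omega)
      exact Nat.mul_lt_mul_of_lt_of_le (by omega) le_rfl hp1
    calc pvMeasure entries.length (pvPieces s e entries)
        ≤ 2 * entries.length * B ^ (pvLen (s, e) - 1) := hle
      _ < B * B ^ (pvLen (s, e) - 1) := hlt
      _ = B ^ (pvLen (s, e)) := by rw [← hpow, Nat.pow_succ, Nat.mul_comm]

theorem pvPop_concat {stack stack' : List (Int × Int)} {r : Int × Int}
    (h : PySem.List.pop? stack = some (r, stack')) : stack = stack' ++ [r] := by
  rcases List.eq_nil_or_concat stack with rfl | ⟨xs, x, rfl⟩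
  · simp [PySem.List.pop?, PySem.List.pyIdx?] at h
  · simp only [List.concat_eq_append] at h ⊢
    rw [PySem.List.pop?_last] at h
    cases h; rfl

theorem pvMeasure_append (k : Nat) (a b : List (Int × Int)) :
    pvMeasure k (a ++ b) = pvMeasure k a + pvMeasure k b := by
  simp [pvMeasure]

-- the `while len(ranges_to_check) > 0` loop of A
def pvLoopA (entries : List (Int × Int × Int)) (stack nxt : List (Int × Int)) :
    List (Int × Int) :=
  match h : PySem.List.pop? stack with
  | none => nxt
  | some (r, stack') =>
      let res := entries.foldl (pvStepA r.1 r.2) (false, nxt, stack')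
      if res.1 then pvLoopA entries res.2.2 res.2.1
      else pvLoopA entries res.2.2 (res.2.1 ++ [r])
termination_by pvMeasure entries.length stack
decreasing_by
  all_goals
    have hst := pvPop_concat h
    subst hst
    simp only [List.foldl_attach, pvFoldA_char]
    simp only [pvMeasure_append]
    have hlt := pvMeasure_pieces_lt r.1 r.2 entries
    simp only [pvMeasure, List.map_cons, List.map_nil, List.sum_cons, List.sum_nil,
      pvLen] at *
    omega

def find_lowest_location_b (maps : List (String × List (String × Int × Int × Int)))
    (seeds : List Int) : Int :=
  let seed_ranges := (PySem.List.pyRange 0 (seeds.length : Int) 2).foldl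
    (fun acc i => acc ++ [(PySem.List.pyGetD seeds i 0,
      PySem.List.pyGetD seeds i 0 + PySem.List.pyGetD seeds (i + 1) 0)]) []
  let final := ((PySem.Dict.ofList maps).values).foldl
    (fun rtc mapping => pvLoopA (PySem.Dict.ofList mapping).values rtc []) seed_ranges
  ((PySem.List.min2? final Prod.fst Prod.snd).getD (0, 0)).1

-- ===== PORT B =====
-- body of B's single collecting pass (state: mapped overlaps, leftover pieces)
def pvStepB (s e : Int) (st : List (Int × Int) × List (Int × Int))
    (t : Int × Int × Int) : List (Int × Int) × List (Int × Int) :=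
  if max s t.2.1 < min e (t.2.1 + t.2.2) then
    (st.1 ++ [(max s t.2.1 - t.2.1 + t.1, min e (t.2.1 + t.2.2) - t.2.1 + t.1)],
     st.2 ++ (if max s t.2.1 > s then [(s, max s t.2.1)] else []) ++
             (if e > min e (t.2.1 + t.2.2) then [(min e (t.2.1 + t.2.2), e)] else []))
  else st

theorem pvFoldB_char (s e : Int) (entries : List (Int × Int × Int)) :
    ∀ (m0 r0 : List (Int × Int)),
      entries.foldl (pvStepB s e) (m0, r0) =
        (m0 ++ pvMapped s e entries, r0 ++ pvPieces s e entries) := by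
  induction entries with
  | nil => intro m0 r0; simp [pvMapped, pvPieces]
  | cons t rest ih =>
      intro m0 r0
      simp only [List.foldl_cons, pvStepB, pvMapped, pvPieces, List.flatMap_cons]
      by_cases h : max s t.2.1 < min e (t.2.1 + t.2.2)
      · simp only [h, if_pos, ih, pvMapped, pvPieces]
        simp [List.append_assoc]
      · simp only [h, ih, pvMapped, pvPieces]
        simp

def pvConvert (entries : List (Int × Int × Int)) (s e : Int) : List (Int × Int) :=
  let mr := entries.foldl (pvStepB s e) ([], [])
  if mr.1 = [] then [(s, e)]
  else mr.1 ++ mr.2.attach.flatMap (fun q => pvConvert entries q.1.1 q.1.2)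
termination_by (e - s).toNat
decreasing_by
  have hq : q.1 ∈ (entries.foldl (pvStepB s e) ([], [])).2 := by
    have h2 : q.1 ∈ (entries.attach.foldl (fun st x => pvStepB s e st x.1) ([], [])).2 := q.2
    simpa only [List.foldl_attach] using h2
  rw [pvFoldB_char] at hq
  simp only [List.nil_append] at hq
  have := pvPieces_len_lt (s := s) (e := e) hq
  simpa [pvLen] using this

-- Source B's _pairs: on a one-element tail Python raises IndexError (outside Pre_),
-- so that branch is unreachable under the claim; the port returns [] there.
def pvPairs : List Int → List (Int × Int)
  | a :: b :: rest => (a, a + b) :: pvPairs rest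
  | _ => []

def find_lowest_location_b_alt (maps : List (String × List (String × Int × Int × Int)))
    (seeds : List Int) : Int :=
  let final := ((PySem.Dict.ofList maps).values).foldl
    (fun ranges mapping =>
      ranges.flatMap (fun r => pvConvert (PySem.Dict.ofList mapping).values r.1 r.2))
    (pvPairs seeds)
  ((PySem.List.min2? final Prod.fst Prod.snd).getD (0, 0)).1

-- ===== PRECONDITION & SPEC =====
-- A raises IndexError on odd-length seed lists and ValueError (min of empty) on
-- empty ones; B raises the same way there, so those inputs lie outside Pre_.
def Pre_find_lowest_location_b (maps : List (String × List (String × Int × Int × Int)))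
    (seeds : List Int) : Prop := seeds ≠ [] ∧ seeds.length % 2 = 0
instance (maps : List (String × List (String × Int × Int × Int))) (seeds : List Int) :
    Decidable (Pre_find_lowest_location_b maps seeds) := by
  unfold Pre_find_lowest_location_b; infer_instance

def pvWitness_find_lowest_location_b :
    (List (String × List (String × Int × Int × Int))) × List Int :=
  ([("a", [("x", (10, 2, 3))])], [1, 4])

def Spec_find_lowest_location_b (maps : List (String × List (String × Int × Int × Int)))
    (seeds : List Int) (out : Int) : Prop := out = find_lowest_location_b_alt maps seeds
instance (maps : List (String × List (String × Int × Int × Int))) (seeds : List Int)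
    (out : Int) : Decidable (Spec_find_lowest_location_b maps seeds out) := by
  unfold Spec_find_lowest_location_b; infer_instance

-- ===== CLAIM (what is proved, stated in full; the proofs are below) =====
def Claim_equal_find_lowest_location_b : Prop := ∀ (maps : List (String × List (String × Int × Int × Int))) (seeds : List Int), Dom_find_lowest_location_b maps seeds → Pre_find_lowest_location_b maps seeds → Spec_find_lowest_location_b maps seeds (find_lowest_location_b maps seeds)

-- ===== LEMMAS AND PROOFS =====

theorem pvFlatMap_attach (l : List (Int × Int)) (f : Int × Int → List (Int × Int)) :
    l.attach.flatMap (fun q => f q.1) = l.flatMap f := by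
  simp

theorem pvMapped_eq_nil_iff (s e : Int) (en : List (Int × Int × Int)) :
    pvMapped s e en = [] ↔ pvFound s e en = false := by
  induction en with
  | nil => simp [pvMapped, pvFound]
  | cons t rest ih =>
      by_cases h : max s t.2.1 < min e (t.2.1 + t.2.2)
      · simp [pvMapped, pvFound, h]
      · simp only [pvMapped, pvFound, List.flatMap_cons, List.any_cons, h] at *
        simpa [h] using ih

theorem pvPieces_eq_nil_of_not_found {s e : Int} {en : List (Int × Int × Int)}
    (h : pvFound s e en = false) : pvPieces s e en = [] := by
  induction en with
  | nil => simp [pvPieces]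
  | cons t rest ih =>
      simp only [pvFound, List.any_cons, Bool.or_eq_false_iff, decide_eq_false_iff_not] at h
      simp only [pvPieces, List.flatMap_cons, h.1, if_neg, List.nil_append]
      exact ih (by simpa [pvFound] using h.2)

theorem pvConvert_not_found {en : List (Int × Int × Int)} {s e : Int}
    (h : pvFound s e en = false) : pvConvert en s e = [(s, e)] := by
  rw [pvConvert]
  rw [pvFoldB_char]
  simp [pvMapped_eq_nil_iff, h]

theorem pvConvert_found {en : List (Int × Int × Int)} {s e : Int}
    (h : pvFound s e en = true) :
    pvConvert en s e = pvMapped s e en ++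
      (pvPieces s e en).flatMap (fun q => pvConvert en q.1 q.2) := by
  rw [pvConvert]
  rw [pvFoldB_char]
  simp only [List.nil_append]
  rw [if_neg (by simp [pvMapped_eq_nil_iff, h])]
  congr 1
  exact pvFlatMap_attach (pvPieces s e en) (fun p => pvConvert en p.1 p.2)

theorem pvLoopA_eq_none {entries : List (Int × Int × Int)} {stack nxt : List (Int × Int)}
    (h : PySem.List.pop? stack = none) : pvLoopA entries stack nxt = nxt := by
  rw [pvLoopA]
  split
  · rfl
  · rename_i r stack' heq
    rw [h] at heq
    cases heq

theorem pvLoopA_eq_some {entries : List (Int × Int × Int)} {stack nxt : List (Int × Int)}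
    {r : Int × Int} {stack' : List (Int × Int)}
    (h : PySem.List.pop? stack = some (r, stack')) :
    pvLoopA entries stack nxt =
      if (entries.foldl (pvStepA r.1 r.2) (false, nxt, stack')).1 = true
      then pvLoopA entries (entries.foldl (pvStepA r.1 r.2) (false, nxt, stack')).2.2
             (entries.foldl (pvStepA r.1 r.2) (false, nxt, stack')).2.1
      else pvLoopA entries (entries.foldl (pvStepA r.1 r.2) (false, nxt, stack')).2.2
             ((entries.foldl (pvStepA r.1 r.2) (false, nxt, stack')).2.1 ++ [r]) := by
  rw [pvLoopA]
  split
  · rename_i heq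
    rw [h] at heq
    cases heq
  · rename_i r' stack'' heq
    rw [h] at heq
    injection heq with heq2
    injection heq2 with e1 e2
    subst e1; subst e2
    rfl

theorem pvLoopA_perm (entries : List (Int × Int × Int)) (stack nxt : List (Int × Int)) :
    (pvLoopA entries stack nxt).Perm
      (nxt ++ stack.flatMap (fun r => pvConvert entries r.1 r.2)) := by
  induction stack, nxt using pvLoopA.induct entries with
  | case1 stack nxt h =>
      have hnil : stack = [] := by
        rcases List.eq_nil_or_concat stack with rfl | ⟨xs, x, rfl⟩
        · rfl
        · simp only [List.concat_eq_append] at h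
          rw [PySem.List.pop?_last] at h; cases h
      subst hnil
      rw [pvLoopA_eq_none h]
      simp
  | case2 stack nxt r stack' h res hfound ih =>
      have hst := pvPop_concat h
      have hres : res = (pvFound r.1 r.2 entries, nxt ++ pvMapped r.1 r.2 entries,
          stack' ++ pvPieces r.1 r.2 entries) := by
        simp only [res]
        rw [List.foldl_attach, pvFoldA_char]
        simp
      rw [hres] at ih hfound
      simp only at ih hfound
      rw [pvLoopA_eq_some h, pvFoldA_char]
      simp only [Bool.false_or]
      rw [if_pos hfound]
      rw [← Multiset.coe_eq_coe] at ih ⊢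
      rw [ih, hst]
      simp only [List.flatMap_append, List.flatMap_cons, List.flatMap_nil, List.append_nil,
        pvConvert_found hfound, ← Multiset.coe_add]
      abel
  | case3 stack nxt r stack' h res hfound ih =>
      have hst := pvPop_concat h
      have hres : res = (pvFound r.1 r.2 entries, nxt ++ pvMapped r.1 r.2 entries,
          stack' ++ pvPieces r.1 r.2 entries) := by
        simp only [res]
        rw [List.foldl_attach, pvFoldA_char]
        simp
      rw [hres] at ih hfound
      simp only at ih hfound
      have hf : pvFound r.1 r.2 entries = false := by simpa using hfound
      have hmap : pvMapped r.1 r.2 entries = [] := (pvMapped_eq_nil_iff _ _ _).2 hf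
      have hpcs : pvPieces r.1 r.2 entries = [] := pvPieces_eq_nil_of_not_found hf
      rw [pvLoopA_eq_some h, pvFoldA_char]
      simp only [Bool.false_or]
      rw [if_neg (by simp [hf])]
      simp only [hmap, hpcs, List.append_nil] at ih ⊢
      rw [← Multiset.coe_eq_coe] at ih ⊢
      rw [ih, hst]
      simp only [List.flatMap_append, List.flatMap_cons, List.flatMap_nil, List.append_nil,
        pvConvert_not_found hf, Prod.mk.eta, ← Multiset.coe_add]
      abel

theorem pvLayers_perm (vals : List (List (String × Int × Int × Int))) :
    ∀ l1 l2 : List (Int × Int), l1.Perm l2 →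
      (vals.foldl (fun rtc mapping =>
          pvLoopA (PySem.Dict.ofList mapping).values rtc []) l1).Perm
      (vals.foldl (fun rg mapping =>
          rg.flatMap (fun r => pvConvert (PySem.Dict.ofList mapping).values r.1 r.2)) l2) := by
  induction vals with
  | nil => intro l1 l2 h; simpa using h
  | cons v rest ih =>
      intro l1 l2 h
      simp only [List.foldl_cons]
      apply ih
      have h1 := pvLoopA_perm (PySem.Dict.ofList v).values l1 []
      simp only [List.nil_append] at h1
      exact h1.trans (h.flatMap (fun a _ => List.Perm.refl _))

-- the seed-pairing loop of A equals B's structural pairing (even length)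
theorem pvPyRange2_cons (k : Int) (hk : 0 ≤ k) :
    PySem.List.pyRange 0 (k + 2) 2 = 0 :: (PySem.List.pyRange 0 k 2).map (· + 2) := by
  rw [PySem.List.pyRange_of_pos _ _ (by norm_num : (0:Int) < 2),
      PySem.List.pyRange_of_pos _ _ (by norm_num : (0:Int) < 2)]
  rw [if_pos (by omega : (0:Int) < k + 2)]
  by_cases hk0 : (0:Int) < k
  · rw [if_pos hk0]
    have h2 : ((k + 2 - 0 + 2 - 1) / 2).toNat = ((k - 0 + 2 - 1) / 2).toNat + 1 := by omega
    rw [h2, List.range_succ_eq_map]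
    simp only [List.map_cons, List.map_map]
    refine List.cons_eq_cons.mpr ⟨by norm_num, ?_⟩
    apply List.map_congr_left
    intro j _
    simp only [Function.comp_apply]
    push_cast
    ring
  · have hz : k = 0 := by omega
    subst hz
    rw [if_neg (by omega)]
    norm_num
theorem pvGetD_cons_shift {a : Int} {l : List Int} {i : Int} (hi : 0 ≤ i) (d : Int) :
    PySem.List.pyGetD (a :: l) (i + 1) d = PySem.List.pyGetD l i d := by
  rw [PySem.List.pyGetD_of_nonneg _ _ (by omega), PySem.List.pyGetD_of_nonneg _ _ hi]
  have : (i + 1).toNat = i.toNat + 1 := by omega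
  rw [this, List.getD_cons_succ]

theorem pvMapSeed_eq (seeds : List Int) (he : seeds.length % 2 = 0) :
    (PySem.List.pyRange 0 (seeds.length : Int) 2).map
      (fun i => (PySem.List.pyGetD seeds i 0,
        PySem.List.pyGetD seeds i 0 + PySem.List.pyGetD seeds (i + 1) 0)) = pvPairs seeds := by
  induction seeds using pvPairs.induct with
  | case1 a b rest ih =>
      have hlen : ((a :: b :: rest).length : Int) = (rest.length : Int) + 2 := by
        simp; omega
      rw [hlen, pvPyRange2_cons _ (by positivity)]
      simp only [List.map_cons, List.map_map, pvPairs]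
      refine List.cons_eq_cons.mpr ⟨?_, ?_⟩
      · have h0 : PySem.List.pyGetD (a :: b :: rest) 0 0 = a := by
          rw [PySem.List.pyGetD_of_nonneg _ _ le_rfl]; rfl
        have h1 : PySem.List.pyGetD (a :: b :: rest) (0 + 1) 0 = b := by
          rw [PySem.List.pyGetD_of_nonneg _ _ (by omega)]; rfl
        rw [h0, h1]
      · rw [← ih (by omega)]
        apply List.map_congr_left
        intro i hi
        have hi0 : 0 ≤ i := by
          have := (PySem.List.mem_pyRange_iff_of_pos (by norm_num : (0:Int) < 2) i).1 hi
          omega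
        simp only [Function.comp_apply]
        have e1 : PySem.List.pyGetD (a :: b :: rest) (i + 2) 0 = PySem.List.pyGetD rest i 0 := by
          have g1 : i + 2 = (i + 1) + 1 := by ring
          rw [g1, pvGetD_cons_shift (by omega), pvGetD_cons_shift hi0]
        have e2 : PySem.List.pyGetD (a :: b :: rest) (i + 2 + 1) 0
            = PySem.List.pyGetD rest (i + 1) 0 := by
          rw [show i + 2 + 1 = ((i + 1) + 1) + 1 by ring, pvGetD_cons_shift (by omega),
            pvGetD_cons_shift (by omega)]
        rw [e1, e2]
  | case2 xs h =>
      rcases xs with _ | ⟨a, _ | ⟨b, rest⟩⟩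
      · simp [pvPairs, PySem.List.pyRange_of_pos (s := 2) 0 0 (by norm_num)]
      · simp at he
      · exact absurd rfl (h a b rest)

-- Python's min over pairs: characterisation and permutation invariance
def pvMinStep (acc : Option (Int × Int)) (x : Int × Int) : Option (Int × Int) :=
  match acc with
  | none => some x
  | some m =>
      if (decide (x.1 < m.1) || (!decide (m.1 < x.1) && decide (x.2 < m.2))) = true then some x
      else some m

theorem pvMin2_eq_foldl (l : List (Int × Int)) :
    PySem.List.min2? l Prod.fst Prod.snd = l.foldl pvMinStep none := by
  unfold PySem.List.min2?
  apply List.foldl_ext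
  intro acc x _
  cases acc <;> rfl

def pvLexLt (a b : Int × Int) : Prop := a.1 < b.1 ∨ (a.1 = b.1 ∧ a.2 < b.2)

theorem pvMinAux : ∀ (l : List (Int × Int)) (m0 : Int × Int),
    ∃ m, l.foldl pvMinStep (some m0) = some m ∧ (m = m0 ∨ m ∈ l) ∧
      ¬ pvLexLt m0 m ∧ ∀ y ∈ l, ¬ pvLexLt y m := by
  intro l
  induction l with
  | nil =>
      intro m0
      refine ⟨m0, rfl, Or.inl rfl, ?_, by simp⟩
      simp [pvLexLt]
  | cons x t ih =>
      intro m0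
      rw [List.foldl_cons]
      by_cases c : (decide (x.1 < m0.1) || (!decide (m0.1 < x.1) && decide (x.2 < m0.2))) = true
      · have hstep : pvMinStep (some m0) x = some x := by simp [pvMinStep, c]
        rw [hstep]
        obtain ⟨m, hf, hmem, hnl, hall⟩ := ih x
        refine ⟨m, hf, ?_, ?_, ?_⟩
        · rcases hmem with rfl | hm
          · exact Or.inr (List.mem_cons_self)
          · exact Or.inr (List.mem_cons_of_mem _ hm)
        · simp only [Bool.or_eq_true, Bool.and_eq_true, Bool.not_eq_true',
            decide_eq_true_eq, decide_eq_false_iff_not] at c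
          simp only [pvLexLt] at hnl ⊢
          omega
        · intro y hy
          rcases List.mem_cons.1 hy with rfl | hyt
          · exact hnl
          · exact hall y hyt
      · have hstep : pvMinStep (some m0) x = some m0 := by simp [pvMinStep, c]
        rw [hstep]
        obtain ⟨m, hf, hmem, hnl, hall⟩ := ih m0
        refine ⟨m, hf, ?_, hnl, ?_⟩
        · rcases hmem with rfl | hm
          · exact Or.inl rfl
          · exact Or.inr (List.mem_cons_of_mem _ hm)
        · intro y hy
          rcases List.mem_cons.1 hy with rfl | hyt
          · simp only [Bool.or_eq_true, Bool.and_eq_true, Bool.not_eq_true',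
              decide_eq_true_eq, decide_eq_false_iff_not, not_or, not_and] at c
            simp only [pvLexLt] at hnl ⊢
            omega
          · exact hall y hyt

theorem pvMin2_eq_of_perm {l1 l2 : List (Int × Int)} (h : l1.Perm l2) :
    PySem.List.min2? l1 Prod.fst Prod.snd = PySem.List.min2? l2 Prod.fst Prod.snd := by
  cases l1 with
  | nil =>
      have h2 : l2 = [] := h.symm.eq_nil
      subst h2; rfl
  | cons a t1 =>
      cases l2 with
      | nil =>
          have h2 := h.eq_nil
          simp at h2
      | cons b t2 =>
          rw [pvMin2_eq_foldl, pvMin2_eq_foldl, List.foldl_cons, List.foldl_cons]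
          have hsa : pvMinStep none a = some a := rfl
          have hsb : pvMinStep none b = some b := rfl
          rw [hsa, hsb]
          obtain ⟨m1, hf1, hmem1, hnl1, hall1⟩ := pvMinAux t1 a
          obtain ⟨m2, hf2, hmem2, hnl2, hall2⟩ := pvMinAux t2 b
          rw [hf1, hf2]
          have hm1 : m1 ∈ a :: t1 := by
            rcases hmem1 with rfl | hm
            · exact List.mem_cons_self
            · exact List.mem_cons_of_mem _ hm
          have hm2 : m2 ∈ b :: t2 := by
            rcases hmem2 with rfl | hm
            · exact List.mem_cons_self
            · exact List.mem_cons_of_mem _ hm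
          have hmin1 : ∀ y ∈ a :: t1, ¬ pvLexLt y m1 := by
            intro y hy
            rcases List.mem_cons.1 hy with rfl | hyt
            · exact hnl1
            · exact hall1 y hyt
          have hmin2 : ∀ y ∈ b :: t2, ¬ pvLexLt y m2 := by
            intro y hy
            rcases List.mem_cons.1 hy with rfl | hyt
            · exact hnl2
            · exact hall2 y hyt
          have h12 : ¬ pvLexLt m2 m1 := hmin1 m2 (h.mem_iff.2 hm2)
          have h21 : ¬ pvLexLt m1 m2 := hmin2 m1 (h.mem_iff.1 hm1)
          obtain ⟨x1, y1⟩ := m1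
          obtain ⟨x2, y2⟩ := m2
          simp only [pvLexLt, not_or, not_and] at h12 h21
          simp only [Option.some.injEq, Prod.mk.injEq]
          omega

-- ===== VERDICT (by name: the statement is the Claim_ definition above) =====
theorem find_lowest_location_b_spec : Claim_equal_find_lowest_location_b := by
  unfold Claim_equal_find_lowest_location_b
  intro maps seeds _ hpre
  unfold Spec_find_lowest_location_b
  obtain ⟨-, heven⟩ := hpre
  simp only [find_lowest_location_b, find_lowest_location_b_alt]
  rw [PySem.List.foldl_append_singleton_eq_map
    (f := fun i => (PySem.List.pyGetD seeds i 0,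
      PySem.List.pyGetD seeds i 0 + PySem.List.pyGetD seeds (i + 1) 0))]
  rw [List.nil_append, pvMapSeed_eq seeds heven]
  have hperm := pvLayers_perm (PySem.Dict.ofList maps).values
    (pvPairs seeds) (pvPairs seeds) (List.Perm.refl _)
  rw [pvMin2_eq_of_perm hperm]
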